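-- pv_equiv track=rewrite | github.com/ChugxScript/Killer-Sodoku-using-Local-Search | main.py | print_error_counts
-- ===== SOURCE A (Python) =====
-- def print_error_counts(board):
--     n = len(board)
--     row_errors = [0] * n
--     col_errors = [0] * n
--
--     # Count errors in each row and column
--     for i in range(n):
--         row_nums = set()
--         col_nums = set()
--         for j in range(n):
--             if board[i][j] == 0:
--                 row_errors[i] += 1
--             elif board[i][j] in row_nums:
--                 row_errors[i] += 1
--             else:
--                 row_nums.add(board[i][j])
--
--             if board[j][i] == 0:
--                 col_errors[i] += 1
--             elif board[j][i] in col_nums: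
--                 col_errors[i] += 1
--             else:
--                 col_nums.add(board[j][i])
--
--     return row_errors, col_errors
-- ===== SOURCE B (Python) =====
-- def print_error_counts(board):
--     n = len(board)
--
--     def line_errors(vals):
--         # sort the nonzero values; distinct count = adjacent-change count
--         s = sorted(v for v in vals if v != 0)
--         distinct = (1 if s else 0) + sum(1 for a, b in zip(s, s[1:]) if a != b)
--         return n - distinct
--
--     row_errors = [line_errors([board[i][j] for j in range(n)]) for i in range(n)]
--     col_errors = [line_errors([board[j][i] for j in range(n)]) for i in range(n)]
--     return row_errors, col_errors
-- ===== Notes on version B (the rewrite author's own statement) =====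
-- stated objective: alternative
-- what changed: Replaces A's per-cell branching into hash sets of seen values with a sort-based pass: each line's nonzero values are sorted and the distinct values counted by scanning adjacent pairs, giving errors = n - distinct; the per-cell if/elif counter mutation disappears.
import Mathlib
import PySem

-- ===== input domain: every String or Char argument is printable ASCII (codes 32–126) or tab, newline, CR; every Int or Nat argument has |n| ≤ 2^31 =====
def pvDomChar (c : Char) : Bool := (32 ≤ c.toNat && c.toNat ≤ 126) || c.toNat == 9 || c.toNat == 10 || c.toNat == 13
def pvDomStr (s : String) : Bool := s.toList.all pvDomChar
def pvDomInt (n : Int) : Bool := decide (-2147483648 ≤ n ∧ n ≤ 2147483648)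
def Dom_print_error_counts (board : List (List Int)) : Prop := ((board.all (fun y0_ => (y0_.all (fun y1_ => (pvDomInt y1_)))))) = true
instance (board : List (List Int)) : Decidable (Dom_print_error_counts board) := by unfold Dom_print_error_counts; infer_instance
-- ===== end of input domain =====

-- B replaces A's per-cell hash-set branching by a sort-then-adjacent-scan
-- distinct count per line, errors = n - distinct (objective: alternative).

-- ===== PORT A =====
-- shared cell accessor board[i][j]; the getD default is unreachable under Pre_
-- (outside Pre_ the Python raises IndexError)
def pvCell (board : List (List Int)) (i j : Nat) : Int := (board.getD i []).getD j 0

-- A's per-cell if/elif/else update of (errors list, seen set), branch order as in A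
def pvAUpd (i : Nat) (st : List Int × PySem.Set Int) (v : Int) : List Int × PySem.Set Int :=
  if v = 0 then (st.1.set i (st.1.getD i 0 + 1), st.2)
  else if PySem.Set.contains st.2 v then (st.1.set i (st.1.getD i 0 + 1), st.2)
  else (st.1, PySem.Set.add st.2 v)

-- A's inner-loop body for fixed i: the row update on board[i][j] then the column update on board[j][i]
def pvAStep (board : List (List Int)) (i : Nat)
    (st : (List Int × PySem.Set Int) × (List Int × PySem.Set Int)) (j : Nat) :
    (List Int × PySem.Set Int) × (List Int × PySem.Set Int) :=
  (pvAUpd i st.1 (pvCell board i j), pvAUpd i st.2 (pvCell board j i))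

def print_error_counts (board : List (List Int)) : List Int × List Int :=
  let n := board.length
  let res := (List.range n).foldl
    (fun (acc : List Int × List Int) i =>
      let r := (List.range n).foldl (pvAStep board i)
        ((acc.1, PySem.Set.empty), (acc.2, PySem.Set.empty))
      (r.1.1, r.2.1))
    (List.replicate n 0, List.replicate n 0)
  res

-- ===== PORT B =====
-- distinct = (1 if s else 0) + sum(1 for a, b in zip(s, s[1:]) if a != b)
def pvDistinct (s : List Int) : Int :=
  (if s = [] then 0 else 1) + ((s.zip s.tail).countP (fun p => p.1 != p.2) : Int)

-- line_errors(vals): sort the nonzero values, count adjacent changes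
def pvLineErrors (n : Nat) (vals : List Int) : Int :=
  let s := PySem.List.sorted (vals.filter (fun v => !(v == 0))) (fun x => x) false
  (n : Int) - pvDistinct s

def print_error_counts_alt (board : List (List Int)) : List Int × List Int :=
  let n := board.length
  ((List.range n).map (fun i => pvLineErrors n ((List.range n).map (fun j => pvCell board i j))),
   (List.range n).map (fun i => pvLineErrors n ((List.range n).map (fun j => pvCell board j i))))

-- ===== PRECONDITION & SPEC =====
-- Pre_ excludes exactly the ragged boards with a row shorter than len(board),
-- on which the Python A raises IndexError.
def Pre_print_error_counts (board : List (List Int)) : Prop :=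
  ∀ row ∈ board, board.length ≤ row.length
instance (board : List (List Int)) : Decidable (Pre_print_error_counts board) := by
  unfold Pre_print_error_counts; infer_instance

def pvWitness_print_error_counts : List (List Int) := [[1, 2], [2, 0]]

def Spec_print_error_counts (board : List (List Int)) (out : List Int × List Int) : Prop := out = print_error_counts_alt board
instance (board : List (List Int)) (out : List Int × List Int) : Decidable (Spec_print_error_counts board out) := by unfold Spec_print_error_counts; infer_instance

-- ===== CLAIM (what is proved, stated in full; the proofs are below) =====
def Claim_equal_print_error_counts : Prop := ∀ (board : List (List Int)), Dom_print_error_counts board → Pre_print_error_counts board → Spec_print_error_counts board (print_error_counts board)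

-- ===== LEMMAS AND PROOFS =====

-- proof-side names for the two value lines
def pvRowVals (board : List (List Int)) (n i : Nat) : List Int :=
  (List.range n).map (fun j => pvCell board i j)

def pvColVals (board : List (List Int)) (n i : Nat) : List Int :=
  (List.range n).map (fun j => pvCell board j i)

-- a foldl whose step acts componentwise splits into two foldls
theorem pv_foldl_prod {α β γ : Type} (f : α → γ → α) (g : β → γ → β)
    (l : List γ) (a : α) (b : β) :
    l.foldl (fun p x => (f p.1 x, g p.2 x)) (a, b) = (l.foldl f a, l.foldl g b) := by
  induction l generalizing a b with
  | nil => rfl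
  | cons x xs ih => simp [List.foldl_cons, ih]

-- number of error increments A makes scanning vs with seen-set s
def pvErrCount : List Int → PySem.Set Int → Int
  | [], _ => 0
  | v :: vs, s =>
    if v = 0 then pvErrCount vs s + 1
    else if PySem.Set.contains s v then pvErrCount vs s + 1
    else pvErrCount vs (PySem.Set.add s v)

theorem pv_set_getD_self (re : List Int) (i : Nat) :
    re.set i (re.getD i 0 + 0) = re := by
  by_cases h : i < re.length
  · rw [List.getD_eq_getElem re 0 h]
    simp
  · simp [List.set_eq_of_length_le (Nat.le_of_not_lt h)]

theorem pv_set_add_set (re : List Int) (i : Nat) (a b : Int) :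
    (re.set i (re.getD i 0 + a)).set i ((re.set i (re.getD i 0 + a)).getD i 0 + b)
      = re.set i (re.getD i 0 + (a + b)) := by
  by_cases h : i < re.length
  · have h' : i < (re.set i (re.getD i 0 + a)).length := by simpa using h
    rw [List.getD_eq_getElem _ 0 h', List.getElem_set_self, List.set_set]
    ring_nf
  · simp [List.set_eq_of_length_le (Nat.le_of_not_lt h)]

theorem pv_fold_upd_fst (i : Nat) (vs : List Int) (re : List Int) (s : PySem.Set Int) :
    (vs.foldl (pvAUpd i) (re, s)).1 = re.set i (re.getD i 0 + pvErrCount vs s) := by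
  induction vs generalizing re s with
  | nil =>
    simp only [List.foldl_nil, pvErrCount]
    exact (pv_set_getD_self re i).symm
  | cons v vs ih =>
    simp only [List.foldl_cons, pvAUpd, pvErrCount]
    by_cases h0 : v = 0
    · rw [if_pos h0, if_pos h0, ih, pv_set_add_set]
      ring_nf
    · rw [if_neg h0, if_neg h0]
      by_cases hc : PySem.Set.contains s v = true
      · rw [if_pos hc, if_pos hc, ih, pv_set_add_set]
        ring_nf
      · rw [if_neg hc, if_neg hc, ih]

theorem pv_len_add (s : PySem.Set Int) (v : Int) :
    ((PySem.Set.add s v).length : Int)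
      = if PySem.Set.contains s v then (s.length : Int) else (s.length : Int) + 1 := by
  by_cases hc : PySem.Set.contains s v = true
  · rw [if_pos hc, PySem.Set.add_of_mem ((PySem.Set.contains_iff s v).1 hc)]
  · rw [if_neg hc,
      PySem.Set.add_of_not_mem (fun hm => hc ((PySem.Set.contains_iff s v).2 hm))]
    push_cast [List.length_append]
    simp only [List.length_singleton]
    omega

theorem pv_errCount_closed (vs : List Int) (s : PySem.Set Int) :
    pvErrCount vs s
      = (vs.length : Int)
        - ((((vs.filter (fun v => !(v == 0))).foldl PySem.Set.add s).length : Int)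
            - (s.length : Int)) := by
  induction vs generalizing s with
  | nil => simp [pvErrCount]
  | cons v vs ih =>
    simp only [pvErrCount, List.filter_cons, List.length_cons]
    by_cases h0 : v = 0
    · rw [if_pos h0]
      have hv : (!(v == 0)) = false := by simp [h0]
      rw [hv, if_neg (by simp)]
      rw [ih]; push_cast; ring
    · have hv : (!(v == 0)) = true := by simp [h0]
      rw [if_neg h0, hv, if_pos rfl, List.foldl_cons]
      by_cases hc : PySem.Set.contains s v = true
      · have hadd : PySem.Set.add s v = s := PySem.Set.add_of_mem ((PySem.Set.contains_iff s v).1 hc)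
        rw [if_pos hc, hadd, ih]
        push_cast; ring
      · rw [if_neg hc, ih (PySem.Set.add s v)]
        have hl := pv_len_add s v
        rw [if_neg hc] at hl
        rw [hl]; push_cast; ring

theorem pv_errCount_empty (vs : List Int) :
    pvErrCount vs PySem.Set.empty
      = (vs.length : Int)
        - ((PySem.Set.ofList (vs.filter (fun v => !(v == 0)))).length : Int) := by
  rw [pv_errCount_closed]
  simp [PySem.Set.empty, PySem.Set.ofList_eq_foldl]

-- adjacent-change count unfolds over a cons
theorem pv_distinct_cons (a b : Int) (t : List Int) :
    pvDistinct (a :: b :: t) = (if a = b then 0 else 1) + pvDistinct (b :: t) := by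
  simp only [pvDistinct, List.tail_cons, List.zip, List.zipWith_cons_cons, List.countP_cons]
  by_cases he : a = b
  · simp [he]
  · have hne : (a != b) = true := by simpa using he
    simp only [hne, he, if_true, if_false, if_neg (List.cons_ne_nil _ _)]
    push_cast
    ring

-- a sorted (Pairwise ≤) list's adjacent-change count is its number of distinct values
theorem pv_distinct_pairwise : ∀ (s : List Int), s.Pairwise (· ≤ ·) →
    pvDistinct s = (s.toFinset.card : Int)
  | [], _ => by simp [pvDistinct]
  | [a], _ => by simp [pvDistinct]
  | a :: b :: t, h => by
    have hrest : (b :: t).Pairwise (· ≤ ·) := h.tail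
    have ih := pv_distinct_pairwise (b :: t) hrest
    have hab : a ≤ b := List.rel_of_pairwise_cons h (by simp)
    rw [pv_distinct_cons, ih]
    by_cases he : a = b
    · have hfs : (a :: b :: t).toFinset = (b :: t).toFinset := by
        subst he; simp
      rw [hfs, if_pos he]
      ring
    · have hnm : a ∉ (b :: t).toFinset := by
        simp only [List.mem_toFinset, List.mem_cons]
        rintro (rfl | hat)
        · exact he rfl
        · exact he (le_antisymm hab (List.rel_of_pairwise_cons hrest hat))
      have hcard : (a :: b :: t).toFinset.card = (b :: t).toFinset.card + 1 := by
        simp only [List.toFinset_cons (a := a)]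
        rw [Finset.card_insert_of_notMem hnm]
      rw [hcard, if_neg he]
      push_cast
      ring

-- the sorted adjacent-scan count equals the hash-set distinct count
theorem pv_distinct_sorted_eq_ofList (l : List Int) :
    pvDistinct (PySem.List.sorted l (fun x => x) false) = ((PySem.Set.ofList l).length : Int) := by
  have hperm : (PySem.List.sorted l (fun x => x) false).Perm l := PySem.List.sorted_perm l _ _
  have hpw : (PySem.List.sorted l (fun x => x) false).Pairwise (· ≤ ·) := by
    simpa using PySem.List.sorted_pairwise l (fun x => x)
  rw [pv_distinct_pairwise _ hpw, List.toFinset_eq_of_perm _ _ hperm]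
  have hnd : (PySem.Set.ofList l).Nodup := PySem.Set.nodup_ofList l
  have hmem : (PySem.Set.ofList l).toFinset = l.toFinset := by
    ext x; simp [List.mem_toFinset, PySem.Set.mem_ofList]
  rw [← hmem, List.toFinset_card_of_nodup hnd]

theorem pv_lineErrors_eq (n : Nat) (vs : List Int) :
    pvLineErrors n vs
      = (n : Int) - ((PySem.Set.ofList (vs.filter (fun v => !(v == 0)))).length : Int) := by
  rw [pvLineErrors, pv_distinct_sorted_eq_ofList]

-- the inner loop of A, for fixed i, written over the lists of row/column values
theorem pv_inner_eq (board : List (List Int)) (n i : Nat) (re ce : List Int) :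
    (List.range n).foldl (pvAStep board i) ((re, PySem.Set.empty), (ce, PySem.Set.empty))
      = ((((pvRowVals board n i).foldl (pvAUpd i) (re, PySem.Set.empty))),
         (((pvColVals board n i).foldl (pvAUpd i) (ce, PySem.Set.empty)))) := by
  rw [show pvAStep board i
        = fun st j => (pvAUpd i st.1 (pvCell board i j), pvAUpd i st.2 (pvCell board j i))
      from rfl]
  rw [pv_foldl_prod (fun st1 j => pvAUpd i st1 (pvCell board i j))
      (fun st2 j => pvAUpd i st2 (pvCell board j i))]
  rw [pvRowVals, pvColVals, List.foldl_map, List.foldl_map]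

-- one outer iteration sets index i to its closed-form error count
theorem pv_outer_body (board : List (List Int)) (n i : Nat) (re ce : List Int) :
    (((List.range n).foldl (pvAStep board i) ((re, PySem.Set.empty), (ce, PySem.Set.empty))).1.1,
     ((List.range n).foldl (pvAStep board i) ((re, PySem.Set.empty), (ce, PySem.Set.empty))).2.1)
      = (re.set i (re.getD i 0 + pvLineErrors n (pvRowVals board n i)),
         ce.set i (ce.getD i 0 + pvLineErrors n (pvColVals board n i))) := by
  rw [pv_inner_eq, pv_fold_upd_fst, pv_fold_upd_fst, pv_errCount_empty, pv_errCount_empty]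
  have hr : (pvRowVals board n i).length = n := by simp [pvRowVals]
  have hcn : (pvColVals board n i).length = n := by simp [pvColVals]
  rw [hr, hcn, pv_lineErrors_eq, pv_lineErrors_eq]

-- folding the per-index update over range k fills the first k slots
theorem pv_fold_set (n : Nat) (c : Nat -> Int) (k : Nat) (hk : k <= n) :
    (List.range k).foldl (fun re i => re.set i (re.getD i 0 + c i)) (List.replicate n 0)
      = (List.range k).map c ++ List.replicate (n - k) 0 := by
  induction k with
  | zero => simp
  | succ k ih =>
    have hk' : k <= n := Nat.le_of_succ_le hk
    rw [List.range_succ, List.foldl_append, ih hk']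
    have hlen : ((List.range k).map c).length = k := by simp
    have hnk : n - k = (n - (k + 1)) + 1 := by omega
    rw [hnk, List.replicate_succ, List.foldl_cons, List.foldl_nil]
    rw [List.getD_append_right _ _ _ _ hlen.le, hlen, Nat.sub_self, List.getD_cons_zero]
    rw [List.set_append_right _ _ hlen.le, hlen, Nat.sub_self, List.set_cons_zero]
    simp

theorem pv_main (board : List (List Int)) :
    print_error_counts board = print_error_counts_alt board := by
  show ((List.range board.length).foldl
      (fun (acc : List Int × List Int) i =>
        let r := (List.range board.length).foldl (pvAStep board i)
          ((acc.1, PySem.Set.empty), (acc.2, PySem.Set.empty))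
        (r.1.1, r.2.1))
      (List.replicate board.length 0, List.replicate board.length 0))
    = print_error_counts_alt board
  have hb : (fun (acc : List Int × List Int) i =>
        let r := (List.range board.length).foldl (pvAStep board i)
          ((acc.1, PySem.Set.empty), (acc.2, PySem.Set.empty))
        (r.1.1, r.2.1))
      = fun (acc : List Int × List Int) i =>
        (acc.1.set i (acc.1.getD i 0 + pvLineErrors board.length (pvRowVals board board.length i)),
         acc.2.set i (acc.2.getD i 0 + pvLineErrors board.length (pvColVals board board.length i))) := by
    funext acc i
    exact pv_outer_body board board.length i acc.1 acc.2
  rw [hb, pv_foldl_prod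
        (fun re i => re.set i (re.getD i 0 + pvLineErrors board.length (pvRowVals board board.length i)))
        (fun ce i => ce.set i (ce.getD i 0 + pvLineErrors board.length (pvColVals board board.length i)))
        (List.range board.length) (List.replicate board.length 0) (List.replicate board.length 0),
      pv_fold_set _ _ _ (le_refl _), pv_fold_set _ _ _ (le_refl _)]
  simp [print_error_counts_alt, pvRowVals, pvColVals]

-- ===== VERDICT (by name: the statement is the Claim_ definition above) =====
theorem print_error_counts_spec : Claim_equal_print_error_counts := by
  intro board _ _
  unfold Spec_print_error_counts
  exact pv_main board
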